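-- pv_equiv track=rewrite | github.com/CarlosSoPe6/iot-almacen | pi_scanner/pi_scanner.py | diference
-- ===== SOURCE A (Python) =====
-- def diference(a, b):
--     map = {}
--     for x in b:
--         map[x] = True
--     diff = []
--     for x in a:
--         if x not in map:
--             diff.append(x)
--     return diff
-- ===== SOURCE B (Python) =====
-- def diference(a, b):
--     diff = list(a)
--     for y in b:
--         diff = [x for x in diff if x != y]
--     return diff
-- ===== Notes on version B (the rewrite author's own statement) =====
-- stated objective: alternative
-- what changed: Instead of building a dict of b and filtering a by membership, B loops over b and deletes all occurrences of each value from a working copy of a, using only equality comparisons and no membership test or index structure.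
import Mathlib
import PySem

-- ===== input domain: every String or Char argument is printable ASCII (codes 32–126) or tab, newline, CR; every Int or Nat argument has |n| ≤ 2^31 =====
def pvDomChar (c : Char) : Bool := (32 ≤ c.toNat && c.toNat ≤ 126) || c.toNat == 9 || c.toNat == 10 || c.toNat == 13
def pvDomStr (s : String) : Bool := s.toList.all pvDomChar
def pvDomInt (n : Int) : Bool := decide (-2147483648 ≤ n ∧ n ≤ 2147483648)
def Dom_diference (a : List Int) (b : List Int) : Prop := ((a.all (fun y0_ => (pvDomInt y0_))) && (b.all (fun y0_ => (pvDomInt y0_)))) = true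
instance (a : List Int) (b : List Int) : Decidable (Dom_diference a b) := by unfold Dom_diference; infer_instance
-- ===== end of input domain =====

-- B replaces A's dict-index-then-filter with successive deletion of each value of b (equality only); same return value, no speed claim.

-- ===== PORT A =====
-- A: build a dict keyed by the elements of b, then filter a by dict membership.
def diference (a : List Int) (b : List Int) : List Int :=
  let map := b.foldl (fun d x => d.insert x true) (PySem.Dict.empty)
  let diff := a.foldl (fun diff x => if !(map.contains x) then diff ++ [x] else diff) []
  diff

-- ===== PORT B =====
-- B: start from a copy of a and delete all occurrences of each y ∈ b in turn.
def diference_alt (a : List Int) (b : List Int) : List Int :=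
  b.foldl (fun diff y => diff.filter (fun x => x != y)) a

-- ===== PRECONDITION & SPEC =====
def Spec_diference (a : List Int) (b : List Int) (out : List Int) : Prop := out = diference_alt a b
instance (a : List Int) (b : List Int) (out : List Int) : Decidable (Spec_diference a b out) := by unfold Spec_diference; infer_instance

-- ===== CLAIM (what is proved, stated in full; the proofs are below) =====
def Claim_equal_diference : Prop := ∀ (a : List Int) (b : List Int), Dom_diference a b → Spec_diference a b (diference a b)

-- ===== LEMMAS AND PROOFS =====
-- the dict built by A's first loop contains x iff x ∈ b
theorem contains_foldl_insert_true (b : List Int) (x : Int) :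
    ((b.foldl (fun d x => d.insert x true) (PySem.Dict.empty : PySem.Dict Int Bool)).contains x)
      = b.contains x := by
  rw [PySem.Dict.contains_eq_decide_mem_keys, PySem.Dict.keys_foldl_insert]
  simp [PySem.Set.mem_update, PySem.Dict.keys_empty]

-- A's second loop is a filter by the same predicate
theorem foldl_append_filter (p : Int → Bool) (a : List Int) (acc : List Int) :
    a.foldl (fun diff x => if p x then diff ++ [x] else diff) acc
      = acc ++ a.filter p := by
  induction a generalizing acc with
  | nil => simp
  | cons h t ih =>
    simp only [List.foldl_cons, List.filter_cons]
    by_cases hp : p h = true <;> simp [hp, ih]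

-- B's successive deletions amount to one filter by non-membership in b
theorem foldl_filter_ne (b acc : List Int) :
    b.foldl (fun diff y => diff.filter (fun x => x != y)) acc
      = acc.filter (fun x => !(b.contains x)) := by
  induction b generalizing acc with
  | nil => simp
  | cons y t ih =>
    simp only [List.foldl_cons, ih, List.filter_filter]
    apply List.filter_congr
    intro x _
    by_cases h : x = y <;> simp [h]

-- ===== VERDICT (by name: the statement is the Claim_ definition above) =====
theorem diference_spec : Claim_equal_diference := by
  intro a b _
  unfold Spec_diference diference diference_alt
  simp only [contains_foldl_insert_true, foldl_append_filter, List.nil_append, foldl_filter_ne]
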